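-- pv_equiv track=rewrite | github.com/myakhlaqi/codility_practice | Toptal/Task2.py | solution
-- ===== SOURCE A (Python) =====
-- def solution(P,Q):
--     """Find the minimum number of the car for given P and Q and
--
--     Args:
--         P (list): list of number of people inside corresponding car in Q
--         Q (list): maximum capacity of a car
--
--     Returns:
--         int: minimum number of the car reqired for all
--     """
--     n=len(P)
--     Q_empty=[(Q[i]-P[i]) for i in range(n)]
--     Q_empty.sort(reverse=True)
--     car_count=0
--     i=sum(P)
--     j=0
--     while(i>0):
--         i-=Q_empty[j]
--         car_count+=1
--     return car_count
-- ===== SOURCE B (Python) =====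
-- def solution(P, Q):
--     total = sum(P)
--     if total <= 0:
--         return 0
--     m = max(q - p for q, p in zip(Q, P))
--     return -(-total // m)
-- ===== Notes on version B (the rewrite author's own statement) =====
-- stated objective: faster
-- what changed: Replaces building and reverse-sorting the slack list plus a repeated-subtraction counting loop (whose index never advances, so it always subtracts the maximum slack) by a single max scan and one arithmetic ceiling division.
import Mathlib
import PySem

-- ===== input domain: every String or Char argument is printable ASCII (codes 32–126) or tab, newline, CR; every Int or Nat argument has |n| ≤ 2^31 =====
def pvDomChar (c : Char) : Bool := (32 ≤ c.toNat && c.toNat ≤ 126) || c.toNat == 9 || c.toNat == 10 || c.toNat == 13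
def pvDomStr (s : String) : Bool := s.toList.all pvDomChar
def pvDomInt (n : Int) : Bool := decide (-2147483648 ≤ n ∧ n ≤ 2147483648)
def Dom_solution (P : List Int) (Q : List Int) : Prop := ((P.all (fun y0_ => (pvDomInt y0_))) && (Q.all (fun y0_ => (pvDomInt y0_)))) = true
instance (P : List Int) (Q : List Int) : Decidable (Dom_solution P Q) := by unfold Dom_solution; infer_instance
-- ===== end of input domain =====

-- B replaces A's reverse-sort + repeated-subtraction loop (which always subtracts the maximum
-- slack, since its index j never advances) by a max scan and one ceiling division; faster.


-- ===== PORT A =====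
-- the while loop; fuel i.toNat suffices on Pre_ (each pass subtracts the positive head);
-- the 'none' arm is Python's IndexError, unreachable under Pre_
def solutionLoopA (qe : List Int) : Nat → Int → Int → Int
  | 0, _, c => c
  | f+1, i, c =>
    if 0 < i then
      match PySem.List.pyGet? qe 0 with
      | some x => solutionLoopA qe f (i - x) (c + 1)
      | none => c
    else c

def solution (P : List Int) (Q : List Int) : Int :=
  let n := P.length
  -- Q[i]/P[i]: in range for every i < n under Pre_ (pyGetD default never read there)
  let qe := (List.range n).map (fun (i : Nat) => PySem.List.pyGetD Q (i : Int) 0 - PySem.List.pyGetD P (i : Int) 0)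
  let qes := PySem.List.sorted qe (fun x => x) true
  solutionLoopA qes (P.sum).toNat (P.sum) 0

-- ===== PORT B =====
-- the 'none' arm is Python's max() on an empty sequence, unreachable (total > 0 forces P ≠ [])
def solution_alt (P : List Int) (Q : List Int) : Int :=
  let total := P.sum
  if total ≤ 0 then 0
  else
    match PySem.List.max? (List.zipWith (fun q p => q - p) Q P) (fun x => x) with
    | some m => -(PySem.Int.floordiv (-total) m)
    | none => 0

-- ===== PRECONDITION & SPEC =====
-- Pre_ excludes exactly the inputs where A does not return: len(Q) < len(P) (IndexError building
-- Q_empty) and sum(P) > 0 with no positive slack (the while loop never terminates).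
def Pre_solution (P : List Int) (Q : List Int) : Prop :=
  P.length ≤ Q.length ∧ (P.sum ≤ 0 ∨ ∃ x ∈ List.zipWith (fun q p => q - p) Q P, 0 < x)
instance (P : List Int) (Q : List Int) : Decidable (Pre_solution P Q) := by unfold Pre_solution; infer_instance
def pvWitness_solution : List Int × List Int := ([1, 2], [3, 4])
def Spec_solution (P : List Int) (Q : List Int) (out : Int) : Prop := out = solution_alt P Q
instance (P : List Int) (Q : List Int) (out : Int) : Decidable (Spec_solution P Q out) := by unfold Spec_solution; infer_instance

-- ===== CLAIM (what is proved, stated in full; the proofs are below) =====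
def Claim_equal_solution : Prop := ∀ (P : List Int) (Q : List Int), Dom_solution P Q → Pre_solution P Q → Spec_solution P Q (solution P Q)

-- ===== LEMMAS AND PROOFS =====

lemma qe_eq_zipWith (P Q : List Int) (h : P.length ≤ Q.length) :
    (List.range P.length).map (fun (i : Nat) => PySem.List.pyGetD Q (i : Int) 0 - PySem.List.pyGetD P (i : Int) 0)
      = List.zipWith (fun q p => q - p) Q P := by
  apply List.ext_getElem
  · simp; omega
  · intro i h1 h2
    simp only [List.getElem_map, List.getElem_range, List.getElem_zipWith,
      PySem.List.pyGetD_natCast]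
    have hiP : i < P.length := by simpa using h1
    rw [List.getD_eq_getElem _ _ (by omega), List.getD_eq_getElem _ _ (by omega)]

lemma loop_nonpos (qe : List Int) (f : Nat) (i c : Int) (h : ¬ 0 < i) :
    solutionLoopA qe f i c = c := by
  cases f <;> simp [solutionLoopA, h]

lemma loop_ceil (qe : List Int) (x : Int) (hx : 0 < x)
    (hhead : PySem.List.pyGet? qe 0 = some x) :
    ∀ (f : Nat) (i c : Int), 0 < i → i ≤ (f : Int) →
      solutionLoopA qe f i c = c + (-(PySem.Int.floordiv (-i) x)) := by
  intro f
  induction f with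
  | zero => intro i c hi hf; exfalso; omega
  | succ f ih =>
    intro i c hi hf
    simp only [solutionLoopA, if_pos hi, hhead]
    by_cases h : 0 < i - x
    · rw [ih (i - x) (c + 1) h (by omega)]
      have h1 : -(i - x) = -i + 1 * x := by ring
      rw [h1]
      simp only [PySem.Int.floordiv_eq_ediv_of_pos hx]
      rw [Int.add_mul_ediv_right _ _ (by omega)]
      ring
    · rw [loop_nonpos qe f _ _ h]
      have : -(PySem.Int.floordiv (-i) x) = 1 :=
        (PySem.Int.neg_floordiv_neg_eq_iff_of_pos hx).mpr (by constructor <;> omega)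
      omega

-- ===== VERDICT (by name: the statement is the Claim_ definition above) =====
theorem solution_spec : Claim_equal_solution := by
  intro P Q _ hpre
  obtain ⟨hlen, hdisj⟩ := hpre
  unfold Spec_solution solution solution_alt
  simp only []
  rw [qe_eq_zipWith P Q hlen]
  set zw := List.zipWith (fun q p : Int => q - p) Q P with hzw
  by_cases hs : P.sum ≤ 0
  · rw [loop_nonpos _ _ _ _ (by omega)]
    simp [hs]
  · have hpos : ∃ x ∈ zw, 0 < x := by
      rcases hdisj with h | h
      · exact absurd h hs
      · exact h
    obtain ⟨x0, hx0mem, hx0pos⟩ := hpos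
    have hne : zw ≠ [] := by intro h; rw [h] at hx0mem; simp at hx0mem
    -- max? is some M, the greatest value
    obtain ⟨M, hM⟩ : ∃ M, PySem.List.max? zw (fun x => x) = some M := by
      rcases h : PySem.List.max? zw (fun x => x) with _ | M
      · exact absurd ((PySem.List.max?_eq_none_iff zw (fun x => x)).mp h) hne
      · exact ⟨M, rfl⟩
    have hMmax : ∀ y ∈ zw, y ≤ M := PySem.List.max?_isMax hM
    have hMpos : 0 < M := lt_of_lt_of_le hx0pos (hMmax x0 hx0mem)
    -- the sorted-descending list is nonempty with head = M
    set qes := PySem.List.sorted zw (fun x : Int => x) true with hqes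
    have hqesne : qes ≠ [] := by
      intro h; exact hne ((PySem.List.sorted_eq_nil_iff zw (fun x : Int => x) true).mp h)
    obtain ⟨m0, t, hcons⟩ : ∃ m0 t, qes = m0 :: t := by
      cases hq : qes with
      | nil => exact absurd hq hqesne
      | cons a b => exact ⟨a, b, rfl⟩
    have hm0mem : m0 ∈ zw := by
      have : m0 ∈ qes := by rw [hcons]; exact List.mem_cons_self
      exact (PySem.List.mem_sorted zw (fun x : Int => x) true m0).mp this
    have hMmem : M ∈ zw := PySem.List.max?_mem hM
    have hge : ∀ y ∈ zw, y ≤ m0 := PySem.List.key_head_sorted_rev_ge zw (fun x : Int => x) hcons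
    have hm0M : m0 = M := le_antisymm (hMmax m0 hm0mem) (hge M hMmem)
    have hhead : PySem.List.pyGet? qes 0 = some M := by
      rw [hcons, PySem.List.pyGet?_zero_cons, hm0M]
    rw [loop_ceil qes M (by omega) hhead _ _ _ (by omega) (by omega)]
    simp [hM, hs]
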